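-- pv_equiv track=rewrite | github.com/rwth-i6/i6_experiments | users/gunz/setups/common/analysis/tse_tina.py | get_word_boundaries
-- ===== SOURCE A (Python) =====
-- from typing import Dict, List, Iterator, Tuple
--
-- def get_word_boundaries(allos: List[str]) -> Tuple[List[int], List[int]]:
--     word_starts = []
--     word_ends = []
--     for t, allo in enumerate(allos):
--         is_sil = "[SILENCE]" in allo
--
--         if not is_sil and "@i" in allo and (t == 0 or allos[t - 1] != allo):
--             word_starts.append(t)
--         if not is_sil and "@f" in allo and (t == len(allos) - 1 or allos[t + 1] != allo):
--             word_ends.append(t)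
--
--     return word_starts, word_ends
-- ===== SOURCE B (Python) =====
-- def get_word_boundaries(allos):
--     # Run-based scan: group consecutive equal labels into runs; a non-silence
--     # run contributes its first index as a word start (if "@i" in label) and
--     # its last index as a word end (if "@f" in label).
--     word_starts = []
--     word_ends = []
--     n = len(allos)
--     i = 0
--     while i < n:
--         label = allos[i]
--         j = i + 1
--         while j < n and allos[j] == label:
--             j += 1
--         if "[SILENCE]" not in label:
--             if "@i" in label:
--                 word_starts.append(i)
--             if "@f" in label:
--                 word_ends.append(j - 1)
--         i = j
--     return word_starts, word_ends
-- ===== Notes on version B (the rewrite author's own statement) =====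
-- stated objective: alternative
-- what changed: A tests every element against both neighbours via indexing; B scans maximal runs of consecutive equal labels and emits the run's first index as a start and last index as an end, one append pair per run.
import Mathlib
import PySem

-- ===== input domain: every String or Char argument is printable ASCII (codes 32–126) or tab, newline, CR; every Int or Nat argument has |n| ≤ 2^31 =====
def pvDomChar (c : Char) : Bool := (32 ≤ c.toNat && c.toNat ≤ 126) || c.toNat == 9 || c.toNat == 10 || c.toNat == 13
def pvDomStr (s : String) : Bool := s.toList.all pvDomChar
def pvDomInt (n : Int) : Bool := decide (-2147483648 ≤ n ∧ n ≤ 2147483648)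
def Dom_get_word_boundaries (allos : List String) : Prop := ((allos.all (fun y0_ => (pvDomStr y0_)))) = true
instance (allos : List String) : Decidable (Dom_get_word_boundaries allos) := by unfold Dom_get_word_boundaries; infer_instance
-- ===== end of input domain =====

-- B replaces A's per-element neighbour tests by a scan over maximal runs of equal labels
-- (a run's first index gives a word start, its last index a word end); alternative decomposition.


-- ===== PORT A =====
-- one loop iteration of A: append t to word_starts / word_ends under A's neighbour conditions
def gwbStep (allos : List String) (t : Int) (allo : String) (acc : List Int × List Int) :
    List Int × List Int :=
  let is_sil := PySem.Str.isIn "[SILENCE]" allo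
  ((if (!is_sil && PySem.Str.isIn "@i" allo
                && (t == 0 || !(PySem.List.pyGetD allos (t - 1) "" == allo)))
    then acc.1 ++ [t] else acc.1),
   (if (!is_sil && PySem.Str.isIn "@f" allo
                && (t == (allos.length : Int) - 1 || !(PySem.List.pyGetD allos (t + 1) "" == allo)))
    then acc.2 ++ [t] else acc.2))

-- "for t, allo in enumerate(allos)" as structural recursion carrying the counter t
def gwbGo (allos : List String) (t : Int) (acc : List Int × List Int) :
    List String → List Int × List Int
  | [] => acc
  | allo :: rest => gwbGo allos (t + 1) (gwbStep allos t allo acc) rest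

def get_word_boundaries (allos : List String) : List Int × List Int :=
  gwbGo allos 0 ([], []) allos

-- ===== PORT B =====
-- B's run scan: the inner "while j < n and allos[j] == label" is the takeWhile count k;
-- the outer loop resumes at index j = t+1+k, i.e. on the remaining list rest.drop k
def gwbAltGo (t : Int) : List String → List Int × List Int
  | [] => ([], [])
  | label :: rest =>
    let k := (rest.takeWhile (fun x => x == label)).length
    let p := gwbAltGo (t + 1 + (k : Int)) (rest.drop k)
    if PySem.Str.isIn "[SILENCE]" label then p
    else ((if PySem.Str.isIn "@i" label then t :: p.1 else p.1),
          (if PySem.Str.isIn "@f" label then (t + (k : Int)) :: p.2 else p.2))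
  termination_by l => l.length
  decreasing_by simp [List.length_drop]

def get_word_boundaries_alt (allos : List String) : List Int × List Int :=
  gwbAltGo 0 allos

-- ===== PRECONDITION & SPEC =====
def Spec_get_word_boundaries (allos : List String) (out : List Int × List Int) : Prop := out = get_word_boundaries_alt allos
instance (allos : List String) (out : List Int × List Int) : Decidable (Spec_get_word_boundaries allos out) := by unfold Spec_get_word_boundaries; infer_instance

-- ===== CLAIM (what is proved, stated in full; the proofs are below) =====
def Claim_equal_get_word_boundaries : Prop := ∀ (allos : List String), Dom_get_word_boundaries allos → Spec_get_word_boundaries allos (get_word_boundaries allos)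

-- ===== LEMMAS AND PROOFS =====

-- middle form: A's conditions expressed locally (prev = previous element, next = rest.head?)
def gwbMid (prev : Option String) (t : Int) : List String → List Int × List Int
  | [] => ([], [])
  | a :: rest =>
    let p := gwbMid (some a) (t + 1) rest
    ((if (!PySem.Str.isIn "[SILENCE]" a && PySem.Str.isIn "@i" a && !(prev == some a))
      then t :: p.1 else p.1),
     (if (!PySem.Str.isIn "[SILENCE]" a && PySem.Str.isIn "@f" a && !(rest.head? == some a))
      then t :: p.2 else p.2))

-- the accumulator of A's loop only ever grows by appending on the right
theorem gwbGo_acc (allos : List String) (l : List String) :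
    ∀ (t : Int) (ws we : List Int),
      gwbGo allos t (ws, we) l
        = (ws ++ (gwbGo allos t ([], []) l).1, we ++ (gwbGo allos t ([], []) l).2) := by
  induction l with
  | nil => intro t ws we; simp [gwbGo]
  | cons a rest ih =>
    intro t ws we
    show gwbGo allos (t+1) (gwbStep allos t a (ws, we)) rest
        = (ws ++ (gwbGo allos (t+1) (gwbStep allos t a ([], [])) rest).1,
           we ++ (gwbGo allos (t+1) (gwbStep allos t a ([], [])) rest).2)
    have hstep : gwbStep allos t a (ws, we)
        = (ws ++ (gwbStep allos t a ([], [])).1, we ++ (gwbStep allos t a ([], [])).2) := by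
      dsimp only [gwbStep]; split_ifs <;> simp
    rw [hstep, ih]
    have h2 := ih (t+1) (gwbStep allos t a ([],[])).1 (gwbStep allos t a ([],[])).2
    rw [Prod.mk.eta] at h2
    simp [h2]

-- A's backward test "t == 0 or allos[t-1] != allo" at position t = |pre| is "pre.getLast? ≠ allo"
theorem gwb_condStart (pre : List String) (a : String) (l : List String) :
    (((pre.length : Int)) == 0
      || !(PySem.List.pyGetD (pre ++ a :: l) ((pre.length : Int) - 1) "" == a))
    = !(pre.getLast? == some a) := by
  rcases List.eq_nil_or_concat pre with h | ⟨ps, x, h⟩ <;> subst h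
  · simp
  · simp only [List.concat_eq_append]
    have h0 : (((ps ++ [x]).length : Int) == 0) = false := by
      simp [List.length_append]; omega
    have hcast : ((ps ++ [x]).length : Int) - 1 = ((ps.length : Nat) : Int) := by
      simp [List.length_append]
    have hidx : PySem.List.pyGetD (ps ++ [x] ++ a :: l) (((ps ++ [x]).length : Int) - 1) "" = x := by
      rw [hcast, PySem.List.pyGetD_natCast]
      rw [List.append_assoc]
      simp [List.getD_eq_getElem?_getD]
    rw [h0, hidx]
    simp

-- A's forward test "t == len-1 or allos[t+1] != allo" at position t = |pre| is "rest.head? ≠ allo"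
theorem gwb_condEnd (pre : List String) (a : String) (rest : List String) :
    (((pre.length : Int)) == (((pre ++ a :: rest).length : Int)) - 1
      || !(PySem.List.pyGetD (pre ++ a :: rest) ((pre.length : Int) + 1) "" == a))
    = !(rest.head? == some a) := by
  cases rest with
  | nil =>
    have h0 : (((pre.length : Int)) == (((pre ++ [a]).length : Int)) - 1) = true := by
      simp [List.length_append]
    rw [h0]; simp
  | cons b rest' =>
    have h0 : (((pre.length : Int)) == (((pre ++ a :: b :: rest').length : Int)) - 1) = false := by
      simp [List.length_append]; omega
    have hidx : PySem.List.pyGetD (pre ++ a :: b :: rest') ((pre.length : Int) + 1) "" = b := by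
      have hcast : (pre.length : Int) + 1 = ((pre.length + 1 : Nat) : Int) := by push_cast; ring
      rw [hcast, PySem.List.pyGetD_natCast]
      simp [List.getD_eq_getElem?_getD]
    rw [h0, hidx]
    simp

-- A equals the middle form: process the suffix l of pre ++ l at positions |pre|, |pre|+1, …
theorem gwbGo_eq_mid : ∀ (l pre : List String),
    gwbGo (pre ++ l) (pre.length : Int) ([], []) l
      = gwbMid pre.getLast? (pre.length : Int) l := by
  intro l
  induction l with
  | nil => intro pre; simp [gwbGo, gwbMid]
  | cons a rest ih =>
    intro pre
    show gwbGo (pre ++ a :: rest) ((pre.length : Int) + 1)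
          (gwbStep (pre ++ a :: rest) (pre.length : Int) a ([], [])) rest = _
    have hR : gwbGo (pre ++ a :: rest) ((pre.length : Int) + 1) ([], []) rest
        = gwbMid (some a) ((pre.length : Int) + 1) rest := by
      have h := ih (pre ++ [a])
      rw [List.append_assoc] at h
      simpa [List.length_append, List.getLast?_concat] using h
    have hstep := gwbGo_acc (pre ++ a :: rest) rest ((pre.length : Int) + 1)
        (gwbStep (pre ++ a :: rest) (pre.length : Int) a ([], [])).1
        (gwbStep (pre ++ a :: rest) (pre.length : Int) a ([], [])).2
    rw [Prod.mk.eta] at hstep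
    rw [hstep, hR]
    show (_, _) = gwbMid pre.getLast? (pre.length : Int) (a :: rest)
    dsimp only [gwbMid, gwbStep]
    rw [gwb_condStart pre a rest, gwb_condEnd pre a rest]
    split_ifs <;> simp

-- a run of the middle form: k extra repetitions of the label contribute no start and
-- (if the label ends a word) the end index t+k-1
theorem gwbMid_replicate (a : String) : ∀ (k : Nat) (t : Int) (dr : List String),
    dr.head? ≠ some a →
    gwbMid (some a) t (List.replicate k a ++ dr)
      = ((gwbMid (some a) (t + (k : Int)) dr).1,
         if 0 < k ∧ (!PySem.Str.isIn "[SILENCE]" a && PySem.Str.isIn "@f" a) = true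
         then (t + (k : Int) - 1) :: (gwbMid (some a) (t + (k : Int)) dr).2
         else (gwbMid (some a) (t + (k : Int)) dr).2) := by
  intro k
  induction k with
  | zero => intro t dr h; simp
  | succ k ih =>
    intro t dr h
    rw [List.replicate_succ, List.cons_append]
    dsimp only [gwbMid]
    rw [ih (t + 1) dr h]
    cases k with
    | zero =>
      have hh : ((dr.head? == some a) : Bool) = false := beq_eq_false_iff_ne.mpr h
      simp [hh]
    | succ k' =>
      simp [List.replicate_succ]
      split_ifs <;> simp_all <;> ring_nf
      all_goals simp

theorem drop_length_takeWhile (p : String → Bool) (l : List String) :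
    l.drop (l.takeWhile p).length = l.dropWhile p := by
  induction l with
  | nil => simp
  | cons a t ih => by_cases h : p a <;> simp [h, ih]

theorem head?_dropWhile_ne (p : String → Bool) (l : List String) (c : String)
    (h : (l.dropWhile p).head? = some c) : p c = false := by
  induction l with
  | nil => simp at h
  | cons a t ih =>
    rw [List.dropWhile_cons] at h
    split at h
    · exact ih h
    · simp_all

-- B equals the middle form (on any suffix whose first element differs from prev)
theorem gwbAltGo_eq_mid : ∀ (n : Nat) (l : List String), l.length ≤ n →
    ∀ (t : Int) (prev : Option String),
    (∀ a, l.head? = some a → prev ≠ some a) →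
    gwbAltGo t l = gwbMid prev t l := by
  intro n
  induction n with
  | zero =>
    intro l hl t prev _
    rw [List.length_eq_zero_iff.mp (Nat.le_zero.mp hl)]
    simp [gwbAltGo, gwbMid]
  | succ n ihn =>
    intro l hl t prev hprev
    cases l with
    | nil => simp [gwbAltGo, gwbMid]
    | cons a rest =>
      have hpa : prev ≠ some a := hprev a rfl
      obtain ⟨k, hk⟩ : ∃ k, (rest.takeWhile (fun x => x == a)).length = k := ⟨_, rfl⟩
      obtain ⟨dr, hdr⟩ : ∃ dr, rest.dropWhile (fun x => x == a) = dr := ⟨_, rfl⟩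
      have htw : rest.takeWhile (fun x => x == a) = List.replicate k a := by
        rw [List.eq_replicate_iff]
        exact ⟨hk, fun b hb => eq_of_beq (List.mem_takeWhile_imp (p := fun x => x == a) hb)⟩
      have hdrop : rest.drop k = dr := by
        rw [← hk, ← hdr]; exact drop_length_takeWhile _ rest
      have hrest : rest = List.replicate k a ++ dr := by
        conv_lhs => rw [← List.takeWhile_append_dropWhile (p := fun x => x == a) (l := rest)]
        rw [htw, hdr]
      have hdrh : dr.head? ≠ some a := by
        intro hcon
        have := head?_dropWhile_ne (fun x => x == a) rest a (by rw [hdr]; exact hcon)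
        simp at this
      have hlen : dr.length ≤ n := by
        have h1 : dr.length ≤ rest.length := by rw [← hdrop]; simp
        simp at hl; omega
      have hih : gwbAltGo (t + 1 + (k : Int)) dr = gwbMid (some a) (t + 1 + (k : Int)) dr :=
        ihn dr hlen _ (some a) (fun b hb hcon => hdrh (by rw [hb]; exact hcon.symm))
      rw [gwbAltGo, hk, hdrop, hih]
      conv_rhs => rw [show gwbMid prev t (a :: rest)
        = ((if (!PySem.Str.isIn "[SILENCE]" a && PySem.Str.isIn "@i" a && !(prev == some a))
            then t :: (gwbMid (some a) (t + 1) rest).1 else (gwbMid (some a) (t + 1) rest).1),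
           (if (!PySem.Str.isIn "[SILENCE]" a && PySem.Str.isIn "@f" a && !(rest.head? == some a))
            then t :: (gwbMid (some a) (t + 1) rest).2 else (gwbMid (some a) (t + 1) rest).2)) from rfl]
      rw [show gwbMid (some a) (t + 1) rest = gwbMid (some a) (t + 1) (List.replicate k a ++ dr) by
        rw [← hrest]]
      rw [gwbMid_replicate a k (t + 1) dr hdrh]
      have hprevb : ((prev == some a) : Bool) = false := beq_eq_false_iff_ne.mpr hpa
      have hheadb : ((rest.head? == some a) : Bool) = !(k == 0) := by
        rw [hrest]
        cases k with
        | zero => simpa using beq_eq_false_iff_ne.mpr hdrh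
        | succ k' => simp [List.replicate_succ]
      rw [hprevb, hheadb]
      have hidx : t + 1 + (k : Int) - 1 = t + (k : Int) := by ring
      rw [hidx]
      clear hprev hpa hk hdr htw hdrop hrest hdrh hlen hih hprevb hheadb ihn hl
      by_cases hk0 : k = 0 <;>
        cases hsil : PySem.Str.isIn "[SILENCE]" a <;>
        cases hi : PySem.Str.isIn "@i" a <;>
        cases hf : PySem.Str.isIn "@f" a <;>
        simp [hk0, Nat.pos_of_ne_zero]

-- ===== VERDICT (by name: the statement is the Claim_ definition above) =====
theorem get_word_boundaries_spec : Claim_equal_get_word_boundaries := by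
  intro allos _
  unfold Spec_get_word_boundaries get_word_boundaries get_word_boundaries_alt
  have h1 := gwbGo_eq_mid allos []
  simp only [List.nil_append, List.length_nil, Nat.cast_zero, List.getLast?_nil] at h1
  rw [h1]
  exact (gwbAltGo_eq_mid allos.length allos (le_refl _) 0 none (by simp)).symm
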